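-- pv_equiv track=rewrite | github.com/NeoZorK/neozork-hld-prediction | interactive/security/compliance_monitor.py | _calculate_violation_severity
-- ===== SOURCE A (Python) =====
-- from typing import Dict, Any, Optional, List, Tuple
--
-- def _calculate_violation_severity(violations: List[Dict[str, Any]]) -> str:
--     """Calculate overall violation severity."""
--     if not violations:
--         return "none"
--
--     severities = [v.get("violation_details", {}).get("severity", "low") for v in violations]
--
--     if "critical" in severities:
--         return "critical"
--     elif "high" in severities:
--         return "high"
--     elif "medium" in severities:
--         return "medium"
--     else:
--         return "low"
-- ===== SOURCE B (Python) =====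
-- def _calculate_violation_severity(violations):
--     """Calculate overall violation severity (single pass, running max rank)."""
--     if not violations:
--         return "none"
--     priority = {"critical": 3, "high": 2, "medium": 1}
--     best = 0
--     for v in violations:
--         sev = v.get("violation_details", {}).get("severity", "low")
--         best = max(best, priority.get(sev, 0))
--     return {3: "critical", 2: "high", 1: "medium"}.get(best, "low")
-- ===== Notes on version B (the rewrite author's own statement) =====
-- stated objective: alternative
-- what changed: Replaces the intermediate severities list plus up-to-three membership scans with a single pass keeping a running maximum priority rank, translated back to a string at the end.
import Mathlib
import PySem

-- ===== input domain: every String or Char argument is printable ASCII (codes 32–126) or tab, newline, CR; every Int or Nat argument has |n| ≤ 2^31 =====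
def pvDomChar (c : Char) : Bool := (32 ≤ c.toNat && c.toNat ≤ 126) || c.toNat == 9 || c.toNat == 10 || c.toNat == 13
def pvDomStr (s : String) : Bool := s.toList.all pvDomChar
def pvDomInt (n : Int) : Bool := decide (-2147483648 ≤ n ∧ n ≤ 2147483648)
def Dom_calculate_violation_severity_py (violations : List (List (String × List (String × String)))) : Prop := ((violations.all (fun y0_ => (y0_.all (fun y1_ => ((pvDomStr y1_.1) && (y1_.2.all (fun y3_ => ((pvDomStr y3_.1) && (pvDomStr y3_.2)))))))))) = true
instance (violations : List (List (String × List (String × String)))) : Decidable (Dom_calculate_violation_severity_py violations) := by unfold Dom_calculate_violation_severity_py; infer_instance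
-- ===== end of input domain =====

-- B replaces the intermediate severities list and its membership scans with one pass
-- tracking a running maximum priority rank (objective: alternative decomposition).

-- ===== PORT A =====
-- v.get("violation_details", {}).get("severity", "low") : first-match assoc lookup with default
def sevOfA (v : List (String × List (String × String))) : String :=
  (((v.lookup "violation_details").getD []).lookup "severity").getD "low"

def calculate_violation_severity_py (violations : List (List (String × List (String × String)))) : String :=
  if violations = [] then "none"
  else
    let severities := violations.map sevOfA
    if "critical" ∈ severities then "critical"
    else if "high" ∈ severities then "high"
    else if "medium" ∈ severities then "medium"
    else "low"

-- ===== PORT B =====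
def sevOfB (v : List (String × List (String × String))) : String :=
  (((v.lookup "violation_details").getD []).lookup "severity").getD "low"

-- priority_map.get(sev, 0)
def rankB (s : String) : Nat :=
  if s = "critical" then 3 else if s = "high" then 2 else if s = "medium" then 1 else 0

-- {3:'critical',2:'high',1:'medium'}.get(best, 'low')
def backB (n : Nat) : String :=
  if n = 3 then "critical" else if n = 2 then "high" else if n = 1 then "medium" else "low"

def calculate_violation_severity_py_alt (violations : List (List (String × List (String × String)))) : String :=
  if violations = [] then "none"
  else backB (violations.foldl (fun best v => max best (rankB (sevOfB v))) 0)

-- ===== PRECONDITION & SPEC =====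
def Spec_calculate_violation_severity_py (violations : List (List (String × List (String × String)))) (out : String) : Prop := out = calculate_violation_severity_py_alt violations
instance (violations : List (List (String × List (String × String)))) (out : String) : Decidable (Spec_calculate_violation_severity_py violations out) := by unfold Spec_calculate_violation_severity_py; infer_instance

-- ===== CLAIM (what is proved, stated in full; the proofs are below) =====
def Claim_equal_calculate_violation_severity_py : Prop := ∀ (violations : List (List (String × List (String × String)))), Dom_calculate_violation_severity_py violations → Spec_calculate_violation_severity_py violations (calculate_violation_severity_py violations)

-- ===== LEMMAS AND PROOFS =====

-- maximum rank over a list of severity strings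
def mr (l : List String) : Nat := l.foldl (fun m s => max m (rankB s)) 0

theorem mr_foldl (l : List String) : ∀ a : Nat,
    l.foldl (fun m s => max m (rankB s)) a = max a (mr l) := by
  induction l with
  | nil => intro a; simp [mr]
  | cons y ys ih =>
    intro a
    have hy : mr (y :: ys) = max (rankB y) (mr ys) := by
      show ys.foldl _ (max 0 (rankB y)) = _
      rw [ih]; omega
    show ys.foldl _ (max a (rankB y)) = max a (mr (y :: ys))
    rw [ih, hy]; omega

theorem mr_cons (x : String) (l : List String) : mr (x :: l) = max (rankB x) (mr l) := by
  show l.foldl _ (max 0 (rankB x)) = _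
  rw [mr_foldl]; omega

theorem mr_le_three (l : List String) : mr l ≤ 3 := by
  induction l with
  | nil => simp [mr]
  | cons x xs ih =>
    rw [mr_cons]
    have : rankB x ≤ 3 := by unfold rankB; split_ifs <;> omega
    omega

theorem mr_eq_three_iff (l : List String) : mr l = 3 ↔ "critical" ∈ l := by
  induction l with
  | nil => simp [mr]
  | cons x xs ih =>
    have hle := mr_le_three xs
    rw [mr_cons, List.mem_cons]
    by_cases hx : x = "critical"
    · subst hx
      have h3 : rankB "critical" = 3 := by decide
      rw [h3]
      constructor
      · intro _; exact Or.inl rfl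
      · intro _; omega
    · have hr : rankB x ≤ 2 := by unfold rankB; split_ifs <;> simp_all
      constructor
      · intro h
        exact Or.inr (ih.mp (by omega))
      · rintro (h | h)
        · exact absurd h.symm hx
        · have := ih.mpr h; omega

theorem mr_ge_two_iff (l : List String) : 2 ≤ mr l ↔ "critical" ∈ l ∨ "high" ∈ l := by
  induction l with
  | nil => simp [mr]
  | cons x xs ih =>
    have hle := mr_le_three xs
    rw [mr_cons, List.mem_cons, List.mem_cons]
    by_cases h1 : x = "critical"
    · subst h1
      have h3 : rankB "critical" = 3 := by decide
      rw [h3]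
      constructor
      · intro _; exact Or.inl (Or.inl rfl)
      · intro _; omega
    by_cases h2 : x = "high"
    · subst h2
      have h3 : rankB "high" = 2 := by decide
      rw [h3]
      constructor
      · intro _; exact Or.inr (Or.inl rfl)
      · intro _; omega
    · have hr : rankB x ≤ 1 := by unfold rankB; split_ifs <;> simp_all
      constructor
      · intro h
        rcases ih.mp (by omega) with h' | h'
        · exact Or.inl (Or.inr h')
        · exact Or.inr (Or.inr h')
      · rintro ((h | h) | (h | h))
        · exact absurd h.symm h1
        · have := ih.mpr (Or.inl h); omega
        · exact absurd h.symm h2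
        · have := ih.mpr (Or.inr h); omega

theorem mr_ge_one_iff (l : List String) :
    1 ≤ mr l ↔ "critical" ∈ l ∨ "high" ∈ l ∨ "medium" ∈ l := by
  induction l with
  | nil => simp [mr]
  | cons x xs ih =>
    have hle := mr_le_three xs
    rw [mr_cons, List.mem_cons, List.mem_cons, List.mem_cons]
    by_cases h1 : x = "critical"
    · subst h1
      have h3 : rankB "critical" = 3 := by decide
      rw [h3]
      constructor
      · intro _; exact Or.inl (Or.inl rfl)
      · intro _; omega
    by_cases h2 : x = "high"
    · subst h2
      have h3 : rankB "high" = 2 := by decide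
      rw [h3]
      constructor
      · intro _; exact Or.inr (Or.inl (Or.inl rfl))
      · intro _; omega
    by_cases h3 : x = "medium"
    · subst h3
      have h3 : rankB "medium" = 1 := by decide
      rw [h3]
      constructor
      · intro _; exact Or.inr (Or.inr (Or.inl rfl))
      · intro _; omega
    · have hr : rankB x = 0 := by unfold rankB; split_ifs <;> simp_all
      rw [hr]
      constructor
      · intro h
        rcases ih.mp (by omega) with h' | h' | h'
        · exact Or.inl (Or.inr h')
        · exact Or.inr (Or.inl (Or.inr h'))
        · exact Or.inr (Or.inr (Or.inr h'))
      · rintro ((h | h) | (h | h) | (h | h))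
        · exact absurd h.symm h1
        · have := ih.mpr (Or.inl h); omega
        · exact absurd h.symm h2
        · have := ih.mpr (Or.inr (Or.inl h)); omega
        · exact absurd h.symm h3
        · have := ih.mpr (Or.inr (Or.inr h)); omega

theorem chain_eq_back (l : List String) :
    (if "critical" ∈ l then "critical"
     else if "high" ∈ l then "high"
     else if "medium" ∈ l then "medium" else "low") = backB (mr l) := by
  have hle := mr_le_three l
  by_cases hc : "critical" ∈ l
  · have h3 : mr l = 3 := (mr_eq_three_iff l).mpr hc
    simp [hc, h3, backB]
  by_cases hh : "high" ∈ l
  · have h2 : 2 ≤ mr l := (mr_ge_two_iff l).mpr (Or.inr hh)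
    have h3 : mr l ≠ 3 := fun h => hc ((mr_eq_three_iff l).mp h)
    have he : mr l = 2 := by omega
    simp [hc, hh, he, backB]
  by_cases hm : "medium" ∈ l
  · have h1 : 1 ≤ mr l := (mr_ge_one_iff l).mpr (Or.inr (Or.inr hm))
    have h2 : ¬ 2 ≤ mr l := fun h => by
      rcases (mr_ge_two_iff l).mp h with h | h
      · exact hc h
      · exact hh h
    have he : mr l = 1 := by omega
    simp [hc, hh, hm, he, backB]
  · have h1 : ¬ 1 ≤ mr l := fun h => by
      rcases (mr_ge_one_iff l).mp h with h | h | h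
      · exact hc h
      · exact hh h
      · exact hm h
    have he : mr l = 0 := by omega
    simp [hc, hh, hm, he, backB]

-- ===== VERDICT (by name: the statement is the Claim_ definition above) =====
theorem calculate_violation_severity_py_spec : Claim_equal_calculate_violation_severity_py := by
  intro violations _
  unfold Spec_calculate_violation_severity_py
  unfold calculate_violation_severity_py calculate_violation_severity_py_alt
  by_cases h : violations = []
  · simp [h]
  · simp only [h, if_false]
    have hfold : violations.foldl (fun best v => max best (rankB (sevOfB v))) 0
        = mr (violations.map sevOfA) := by
      simp [mr, List.foldl_map, sevOfA, sevOfB]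
    rw [hfold]
    exact chain_eq_back (violations.map sevOfA)
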